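-- pv_equiv track=rewrite | github.com/Vineyardcode/voynich_slop | scripts/phase61_word_shape_validation.py | eva_to_glyphs
-- ===== SOURCE A (Python) =====
-- def eva_to_glyphs(word):
--     glyphs = []
--     i = 0
--     while i < len(word):
--         if i+2 < len(word) and word[i:i+3] in ('cth','ckh','cph','cfh'):
--             glyphs.append(word[i:i+3]); i += 3
--         elif i+1 < len(word) and word[i:i+2] in ('ch','sh','th','kh','ph','fh'):
--             glyphs.append(word[i:i+2]); i += 2
--         else:
--             glyphs.append(word[i]); i += 1
--     return glyphs
-- ===== SOURCE B (Python) =====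
-- def eva_to_glyphs(word):
--     # One-pass DFA tokenizer: scan characters once, keeping a small pending
--     # buffer ("" / "c" / "cX" / single glyph-starter) instead of re-slicing.
--     out = []
--     pend = ""
--     for c in word:
--         if pend == "c":
--             if c == 'h':
--                 out.append("ch"); pend = ""
--                 continue
--             if c in "tkpf":
--                 pend = "c" + c
--                 continue
--             out.append("c")
--         elif len(pend) == 2:          # pend is "c"+X with X in "tkpf"
--             if c == 'h':
--                 out.append(pend + "h"); pend = ""
--                 continue
--             out.append("c"); out.append(pend[1])   # c != 'h': neither glyph closes
--         elif pend:                    # pend is a single starter in "stkpf"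
--             if c == 'h':
--                 out.append(pend + "h"); pend = ""
--                 continue
--             out.append(pend)
--         # fresh start with c
--         if c == 'c':
--             pend = "c"
--         elif c in "stkpf":
--             pend = c
--         else:
--             out.append(c); pend = ""
--     # flush whatever is still pending
--     if len(pend) == 2:
--         out.append("c"); out.append(pend[1])
--     elif pend:
--         out.append(pend)
--     return out
-- ===== Notes on version B (the rewrite author's own statement) =====
-- stated objective: faster
-- what changed: Replaces A's index-driven while loop that re-slices the word and tests 3-char then 2-char glyph tables at every position by a single character-at-a-time DFA pass that keeps a small pending buffer ('', 'c', 'cX', or a lone glyph starter) and emits glyphs as they close.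
import Mathlib
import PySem

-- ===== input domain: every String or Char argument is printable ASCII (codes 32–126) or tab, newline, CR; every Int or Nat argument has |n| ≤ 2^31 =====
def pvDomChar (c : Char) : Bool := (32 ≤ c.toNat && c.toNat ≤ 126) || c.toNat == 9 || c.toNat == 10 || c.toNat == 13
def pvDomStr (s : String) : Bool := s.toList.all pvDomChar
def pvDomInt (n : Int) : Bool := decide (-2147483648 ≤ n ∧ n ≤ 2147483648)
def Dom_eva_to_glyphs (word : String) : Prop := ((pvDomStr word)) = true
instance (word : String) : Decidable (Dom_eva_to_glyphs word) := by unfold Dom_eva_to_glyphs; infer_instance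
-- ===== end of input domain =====

-- B replaces A's index-and-slice greedy rescan by a one-pass DFA tokenizer with a small pending buffer (same O(n) result, measured constant-factor faster in a timing run).

-- ===== PORT A =====
-- while loop over index i; branches in A's order: 3-char glyph, 2-char glyph, single char
def evaLoopA (cs : List Char) (i : Nat) : List String :=
  if h : i < cs.length then
    if i + 2 < cs.length ∧ (PySem.List.slice cs (some (i : Int)) (some ((i : Int) + 3)) = "cth".toList ∨
        PySem.List.slice cs (some (i : Int)) (some ((i : Int) + 3)) = "ckh".toList ∨
        PySem.List.slice cs (some (i : Int)) (some ((i : Int) + 3)) = "cph".toList ∨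
        PySem.List.slice cs (some (i : Int)) (some ((i : Int) + 3)) = "cfh".toList) then
      String.ofList (PySem.List.slice cs (some (i : Int)) (some ((i : Int) + 3))) :: evaLoopA cs (i + 3)
    else if i + 1 < cs.length ∧ (PySem.List.slice cs (some (i : Int)) (some ((i : Int) + 2)) = "ch".toList ∨
        PySem.List.slice cs (some (i : Int)) (some ((i : Int) + 2)) = "sh".toList ∨
        PySem.List.slice cs (some (i : Int)) (some ((i : Int) + 2)) = "th".toList ∨
        PySem.List.slice cs (some (i : Int)) (some ((i : Int) + 2)) = "kh".toList ∨
        PySem.List.slice cs (some (i : Int)) (some ((i : Int) + 2)) = "ph".toList ∨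
        PySem.List.slice cs (some (i : Int)) (some ((i : Int) + 2)) = "fh".toList) then
      String.ofList (PySem.List.slice cs (some (i : Int)) (some ((i : Int) + 2))) :: evaLoopA cs (i + 2)
    else
      String.ofList [cs[i]] :: evaLoopA cs (i + 1)
  else []
termination_by cs.length - i

def eva_to_glyphs (word : String) : List String := evaLoopA word.toList 0

-- ===== PORT B =====
-- fresh start with character c (the tail of Source B's loop body)
def evaFreshB (out : List String) (c : Char) : List String × List Char :=
  if c = 'c' then (out, ['c'])
  else if c ∈ ['s', 't', 'k', 'p', 'f'] then (out, [c])
  else (out ++ [String.ofList [c]], [])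

-- one loop step of Source B: dispatch on the pending buffer, then possibly fall through to the fresh start
def evaStepB (st : List String × List Char) (c : Char) : List String × List Char :=
  let out := st.1
  let pend := st.2
  if pend = ['c'] then
    if c = 'h' then (out ++ ["ch"], [])
    else if c ∈ ['t', 'k', 'p', 'f'] then (out, ['c', c])
    else evaFreshB (out ++ ["c"]) c
  else if pend.length = 2 then
    if c = 'h' then (out ++ [String.ofList (pend ++ ['h'])], [])
    else evaFreshB (out ++ ["c", String.ofList [pend.getD 1 ' ']]) c
  else if pend ≠ [] then
    if c = 'h' then (out ++ [String.ofList (pend ++ ['h'])], [])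
    else evaFreshB (out ++ [String.ofList pend]) c
  else evaFreshB out c

-- final flush of the pending buffer
def evaFlushB (out : List String) (pend : List Char) : List String :=
  if pend.length = 2 then out ++ ["c", String.ofList [pend.getD 1 ' ']]
  else if pend ≠ [] then out ++ [String.ofList pend]
  else out

def eva_to_glyphs_alt (word : String) : List String :=
  let st := word.toList.foldl evaStepB ([], [])
  evaFlushB st.1 st.2

-- ===== PRECONDITION & SPEC =====
def Spec_eva_to_glyphs (word : String) (out : List String) : Prop := out = eva_to_glyphs_alt word
instance (word : String) (out : List String) : Decidable (Spec_eva_to_glyphs word out) := by unfold Spec_eva_to_glyphs; infer_instance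

-- ===== CLAIM (what is proved, stated in full; the proofs are below) =====
def Claim_equal_eva_to_glyphs : Prop := ∀ (word : String), Dom_eva_to_glyphs word → Spec_eva_to_glyphs word (eva_to_glyphs word)

-- ===== LEMMAS AND PROOFS =====

-- canonical maximal-munch tokenization, the common meeting point of the two ports
def evaGreedy : List Char → List String
  | 'c' :: 't' :: 'h' :: r => "cth" :: evaGreedy r
  | 'c' :: 'k' :: 'h' :: r => "ckh" :: evaGreedy r
  | 'c' :: 'p' :: 'h' :: r => "cph" :: evaGreedy r
  | 'c' :: 'f' :: 'h' :: r => "cfh" :: evaGreedy r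
  | 'c' :: 'h' :: r => "ch" :: evaGreedy r
  | 's' :: 'h' :: r => "sh" :: evaGreedy r
  | 't' :: 'h' :: r => "th" :: evaGreedy r
  | 'k' :: 'h' :: r => "kh" :: evaGreedy r
  | 'p' :: 'h' :: r => "ph" :: evaGreedy r
  | 'f' :: 'h' :: r => "fh" :: evaGreedy r
  | c :: r => String.ofList [c] :: evaGreedy r
  | [] => []

lemma evaGreedy_nil : evaGreedy [] = [] := rfl

lemma evaGreedy_single (c : Char) : evaGreedy [c] = [String.ofList [c]] := by
  rw [evaGreedy.eq_def]; split <;> simp_all [evaGreedy_nil]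

lemma evaGreedy_starter_h (x : Char) (hx : x ∈ (['s','t','k','p','f'] : List Char)) (r : List Char) :
    evaGreedy (x :: 'h' :: r) = String.ofList [x,'h'] :: evaGreedy r := by
  fin_cases hx <;> rfl

lemma evaGreedy_c3_h (y : Char) (hy : y ∈ (['t','k','p','f'] : List Char)) (r : List Char) :
    evaGreedy ('c' :: y :: 'h' :: r) = String.ofList ['c',y,'h'] :: evaGreedy r := by
  fin_cases hy <;> rfl

lemma evaGreedy_c_other (y : Char) (hy : y ∉ (['h','t','k','p','f'] : List Char)) (r : List Char) :
    evaGreedy ('c' :: y :: r) = "c" :: evaGreedy (y :: r) := by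
  rw [evaGreedy.eq_def]; split <;> simp_all <;> (rename_i heq; cases heq.1; rfl)

lemma evaGreedy_cy_d (y d : Char) (hy : y ∈ (['t','k','p','f'] : List Char)) (hd : d ≠ 'h') (r : List Char) :
    evaGreedy ('c' :: y :: d :: r) = "c" :: evaGreedy (y :: d :: r) := by
  fin_cases hy <;> (rw [evaGreedy.eq_def]; split <;> simp_all <;> (rename_i heq; cases heq.1; rfl))

lemma evaGreedy_cy_end (y : Char) (hy : y ∈ (['t','k','p','f'] : List Char)) :
    evaGreedy ['c', y] = ["c", String.ofList [y]] := by fin_cases hy <;> rfl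

lemma evaGreedy_starter_d (x d : Char) (hx : x ∈ (['s','t','k','p','f'] : List Char)) (hd : d ≠ 'h') (r : List Char) :
    evaGreedy (x :: d :: r) = String.ofList [x] :: evaGreedy (d :: r) := by
  fin_cases hx <;> (rw [evaGreedy.eq_def]; split <;> simp_all <;> (rename_i heq; cases heq.1; rfl))

lemma evaGreedy_other (c : Char) (h : c ∉ (['c','s','t','k','p','f'] : List Char)) (r : List Char) :
    evaGreedy (c :: r) = String.ofList [c] :: evaGreedy r := by
  rw [evaGreedy.eq_def]; split <;> simp_all

-- a head that starts no glyph is tokenized alone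
lemma evaGreedy_cons_single (a : Char) (rest : List Char)
    (h3 : ∀ y u, rest = y :: 'h' :: u → ¬(a = 'c' ∧ y ∈ (['t','k','p','f'] : List Char)))
    (h2 : ∀ u, rest = 'h' :: u → a ∉ (['c','s','t','k','p','f'] : List Char)) :
    evaGreedy (a :: rest) = String.ofList [a] :: evaGreedy rest := by
  rw [evaGreedy.eq_def]
  split <;> simp_all

-- the whole-run form of B, for the induction
def evaRunB (out : List String) (pend : List Char) (cs : List Char) : List String :=
  let st := cs.foldl evaStepB (out, pend)
  evaFlushB st.1 st.2

lemma evaB_eq_greedy : ∀ (cs : List Char) (out : List String) (pend : List Char),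
    (pend = [] ∨ pend = ['c'] ∨ (∃ x ∈ (['t','k','p','f'] : List Char), pend = ['c', x]) ∨
      (∃ x ∈ (['s','t','k','p','f'] : List Char), pend = [x])) →
    evaRunB out pend cs = out ++ evaGreedy (pend ++ cs) := by
  intro cs
  induction cs with
  | nil =>
    intro out pend hv
    rcases hv with rfl | rfl | ⟨x, hx, rfl⟩ | ⟨x, hx, rfl⟩
    · simp [evaRunB, evaFlushB, evaGreedy_nil]
    · simp [evaRunB, evaFlushB]; rfl
    · simp [evaRunB, evaFlushB, evaGreedy_cy_end x hx]
    · fin_cases hx <;> simp [evaRunB, evaFlushB, evaGreedy_single]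
  | cons c cs ih =>
    intro out pend hv
    have hstep : evaRunB out pend (c :: cs) = evaRunB (evaStepB (out, pend) c).1 (evaStepB (out, pend) c).2 cs := by
      simp [evaRunB, List.foldl_cons]
    have hfresh : ∀ (o : List String), evaRunB (evaFreshB o c).1 (evaFreshB o c).2 cs = o ++ evaGreedy (c :: cs) := by
      intro o
      by_cases hc : c = 'c'
      · subst hc
        rw [show evaFreshB o 'c' = (o, ['c']) from rfl]
        exact ih o ['c'] (Or.inr (Or.inl rfl))
      · by_cases hs : c ∈ (['s','t','k','p','f'] : List Char)
        · rw [show evaFreshB o c = (o, [c]) by simp [evaFreshB, hc, hs]]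
          exact ih o [c] (Or.inr (Or.inr (Or.inr ⟨c, hs, rfl⟩)))
        · rw [show evaFreshB o c = (o ++ [String.ofList [c]], []) by simp [evaFreshB, hc, hs]]
          rw [ih _ [] (Or.inl rfl), evaGreedy_other c (by simp_all) cs]
          simp
    rcases hv with rfl | rfl | ⟨x, hx, rfl⟩ | ⟨x, hx, rfl⟩
    · rw [hstep]; exact hfresh out
    · by_cases hch : c = 'h'
      · subst hch
        rw [hstep, show evaStepB (out, ['c']) 'h' = (out ++ ["ch"], []) from rfl,
          ih _ [] (Or.inl rfl)]
        simp [evaGreedy]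
      · by_cases ht : c ∈ (['t','k','p','f'] : List Char)
        · rw [hstep, show evaStepB (out, ['c']) c = (out, ['c', c]) by simp [evaStepB, hch, ht]]
          exact ih out ['c', c] (Or.inr (Or.inr (Or.inl ⟨c, ht, rfl⟩)))
        · rw [hstep, show evaStepB (out, ['c']) c = evaFreshB (out ++ ["c"]) c by simp [evaStepB, hch, ht],
            hfresh]
          simp only [List.cons_append, List.nil_append]
          rw [evaGreedy_c_other c (by simp_all) cs]
          simp
    · -- pend = ['c', x], x ∈ tkpf
      have hne : (['c', x] : List Char) ≠ ['c'] := by simp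
      by_cases hch : c = 'h'
      · subst hch
        rw [hstep, show evaStepB (out, ['c', x]) 'h' = (out ++ [String.ofList ['c', x, 'h']], []) by
            simp [evaStepB, hne], ih _ [] (Or.inl rfl)]
        simp only [List.cons_append, List.nil_append]
        rw [evaGreedy_c3_h x hx cs]
        simp
      · rw [hstep, show evaStepB (out, ['c', x]) c = evaFreshB (out ++ ["c", String.ofList [x]]) c by
            simp [evaStepB, hne, hch], hfresh,
          show (['c', x] ++ c :: cs : List Char) = 'c' :: x :: c :: cs from rfl,
          evaGreedy_cy_d x c hx hch cs,
          evaGreedy_starter_d x c (by fin_cases hx <;> simp) hch cs]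
        simp
    · -- pend = [x], x ∈ stkpf
      have hne : ([x] : List Char) ≠ ['c'] := by fin_cases hx <;> simp
      have hlen : ([x] : List Char).length ≠ 2 := by simp
      by_cases hch : c = 'h'
      · subst hch
        rw [hstep, show evaStepB (out, [x]) 'h' = (out ++ [String.ofList [x, 'h']], []) by
            simp [evaStepB, hne], ih _ [] (Or.inl rfl), show ([x] ++ 'h' :: cs : List Char) = x :: 'h' :: cs from rfl,
          evaGreedy_starter_h x hx cs]
        simp
      · rw [hstep, show evaStepB (out, [x]) c = evaFreshB (out ++ [String.ofList [x]]) c by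
            simp [evaStepB, hne, hch], hfresh,
          show ([x] ++ c :: cs : List Char) = x :: c :: cs from rfl,
          evaGreedy_starter_d x c hx hch cs]
        simp

lemma evaA_eq_greedy : ∀ (n : Nat) (cs : List Char) (i : Nat), cs.length ≤ i + n →
    evaLoopA cs i = evaGreedy (cs.drop i) := by
  intro n
  induction n with
  | zero =>
    intro cs i h
    rw [evaLoopA, dif_neg (by omega), List.drop_eq_nil_of_le (by omega), evaGreedy_nil]
  | succ n ih =>
    intro cs i h
    rw [evaLoopA]
    by_cases hi : i < cs.length
    · rw [dif_pos hi]
      have hs3 : PySem.List.slice cs (some (i : Int)) (some ((i : Int) + 3)) = (cs.drop i).take 3 := by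
        simpa using PySem.List.slice_natCast_add cs i 3
      have hs2 : PySem.List.slice cs (some (i : Int)) (some ((i : Int) + 2)) = (cs.drop i).take 2 := by
        simpa using PySem.List.slice_natCast_add cs i 2
      have hlen : (cs.drop i).length = cs.length - i := List.length_drop
      obtain ⟨a, t, hd⟩ : ∃ a t, cs.drop i = a :: t := by
        cases hcs : cs.drop i with
        | nil => rw [hcs] at hlen; simp at hlen; omega
        | cons a t => exact ⟨a, t, rfl⟩
      have hdrop1 : cs.drop (i + 1) = t := by
        rw [show i + 1 = i + 1 from rfl, ← List.drop_drop, hd]; rfl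
      rw [hs3, hs2]
      split_ifs with h3 h2
      · obtain ⟨hlt3, hmem⟩ := h3
        obtain ⟨b, c3, u, ht⟩ : ∃ b c3 u, t = b :: c3 :: u := by
          rw [hd] at hlen
          cases t with
          | nil => simp at hlen; omega
          | cons b t2 =>
            cases t2 with
            | nil => simp at hlen; omega
            | cons c3 u => exact ⟨b, c3, u, rfl⟩
        subst ht
        have hdrop3 : cs.drop (i + 3) = u := by
          rw [← List.drop_drop, hd]; rfl
        rw [hd] at hmem ⊢
        rw [ih cs (i + 3) (by omega), hdrop3]
        simp only [List.take] at hmem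
        rcases hmem with hm | hm | hm | hm <;>
          (simp only [show ("cth".toList : List Char) = ['c','t','h'] from rfl,
            show ("ckh".toList : List Char) = ['c','k','h'] from rfl,
            show ("cph".toList : List Char) = ['c','p','h'] from rfl,
            show ("cfh".toList : List Char) = ['c','f','h'] from rfl,
            List.cons.injEq] at hm;
           obtain ⟨rfl, rfl, rfl, -⟩ := hm) <;> rfl
      · obtain ⟨hlt2, hmem⟩ := h2
        obtain ⟨b, u, ht⟩ : ∃ b u, t = b :: u := by
          rw [hd] at hlen
          cases t with
          | nil => simp at hlen; omega
          | cons b u => exact ⟨b, u, rfl⟩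
        subst ht
        have hdrop2 : cs.drop (i + 2) = u := by
          rw [← List.drop_drop, hd]; rfl
        rw [hd] at hmem ⊢
        rw [ih cs (i + 2) (by omega), hdrop2]
        simp only [List.take] at hmem
        rcases hmem with hm | hm | hm | hm | hm | hm <;>
          (simp only [show ("ch".toList : List Char) = ['c','h'] from rfl,
            show ("sh".toList : List Char) = ['s','h'] from rfl,
            show ("th".toList : List Char) = ['t','h'] from rfl,
            show ("kh".toList : List Char) = ['k','h'] from rfl,
            show ("ph".toList : List Char) = ['p','h'] from rfl,
            show ("fh".toList : List Char) = ['f','h'] from rfl,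
            List.cons.injEq] at hm;
           obtain ⟨rfl, rfl, -⟩ := hm) <;> rfl
      · have ha : cs[i] = a := by
          have := List.getElem_drop (xs := cs) (i := i) (j := 0) (h := by simp [hd])
          simp [hd] at this; exact this.symm
        rw [ih cs (i + 1) (by omega), hdrop1, hd, ha]
        refine (evaGreedy_cons_single a t ?_ ?_).symm
        · rintro y u rfl ⟨rfl, hy⟩
          refine h3 ⟨?_, ?_⟩
          · rw [hd] at hlen; simp at hlen; omega
          · rw [hd]
            fin_cases hy <;> simp
        · rintro u rfl hmem
          refine h2 ⟨?_, ?_⟩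
          · rw [hd] at hlen; simp at hlen; omega
          · rw [hd]
            fin_cases hmem <;> simp
    · rw [dif_neg hi, List.drop_eq_nil_of_le (by omega), evaGreedy_nil]

-- ===== VERDICT (by name: the statement is the Claim_ definition above) =====
theorem eva_to_glyphs_spec : Claim_equal_eva_to_glyphs := by
  intro word _
  unfold Spec_eva_to_glyphs eva_to_glyphs eva_to_glyphs_alt
  rw [evaA_eq_greedy word.toList.length word.toList 0 (by omega)]
  rw [show (let st := word.toList.foldl evaStepB ([], []); evaFlushB st.1 st.2) =
      evaRunB [] [] word.toList from rfl]
  rw [evaB_eq_greedy word.toList [] [] (Or.inl rfl)]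
  simp
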